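-- pv_equiv track=rewrite | github.com/austencloud/tka-studio | src/desktop/modern/scripts/run_tests.py | get_pytest_args
-- ===== SOURCE A (Python) =====
-- def get_pytest_args(args):
--     """Convert script arguments to pytest arguments."""
--     pytest_args = ["python", "-m", "pytest"]
--
--     # Default arguments for better output
--     pytest_args.extend(["--tb=short", "-v"])
--
--     # Handle special argument combinations
--     if "--all" in args:
--         # Run all tests including problematic ones
--         pass
--     elif "--collect" in args:
--         pytest_args.extend(["--collect-only", "-q"])
--     elif "--domain" in args:
--         pytest_args.append("tests/specification/domain/")
--     elif "--core" in args:
--         pytest_args.append("tests/specification/core/")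
--     elif "--unit" in args:
--         pytest_args.append("tests/unit/")
--     elif "--integration" in args:
--         pytest_args.append("tests/integration/")
--     elif "--specification" in args:
--         pytest_args.append("tests/specification/")
--     elif "--fast" in args:
--         pytest_args.extend(["-m", "not slow"])
--     elif "--help" in args:
--         pytest_args.append("--help")
--     else:
--         # Default: run working tests (exclude PyQt6 crashes and problematic imports)
--         exclude_patterns = []
--         pytest_args.extend(exclude_patterns)
--
--     # Add any remaining arguments
--     for arg in args:
--         if not arg.startswith("--") or arg in ["--help", "--collect"]:
--             continue
--         if arg not in [
--             "--all",
--             "--domain",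
--             "--core",
--             "--unit",
--             "--integration",
--             "--specification",
--             "--fast",
--         ]:
--             pytest_args.append(arg)
--
--     return pytest_args
-- ===== SOURCE B (Python) =====
-- _RANK = {"--all": 0, "--collect": 1, "--domain": 2, "--core": 3, "--unit": 4,
--          "--integration": 5, "--specification": 6, "--fast": 7, "--help": 8}
-- _PAYLOADS = [[], ["--collect-only", "-q"], ["tests/specification/domain/"],
--              ["tests/specification/core/"], ["tests/unit/"], ["tests/integration/"],
--              ["tests/specification/"], ["-m", "not slow"], ["--help"], []]
--
--
-- def get_pytest_args(args):
--     """Convert script arguments to pytest arguments."""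
--     best = 9  # rank of the highest-priority selector flag seen; 9 = none
--     extra = []
--     for a in args:
--         r = _RANK.get(a)
--         if r is not None:
--             if r < best:
--                 best = r
--         elif a.startswith("--"):
--             extra.append(a)
--     return ["python", "-m", "pytest", "--tb=short", "-v"] + _PAYLOADS[best] + extra
-- ===== Notes on version B (the rewrite author's own statement) =====
-- stated objective: alternative
-- what changed: Replaces A's nine-branch if/elif chain of membership scans plus a second skip-loop by a SINGLE pass over args that simultaneously tracks the minimum selector rank (via a rank dict) and collects passthrough flags, then indexes a payload table with the final rank.
import Mathlib
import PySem

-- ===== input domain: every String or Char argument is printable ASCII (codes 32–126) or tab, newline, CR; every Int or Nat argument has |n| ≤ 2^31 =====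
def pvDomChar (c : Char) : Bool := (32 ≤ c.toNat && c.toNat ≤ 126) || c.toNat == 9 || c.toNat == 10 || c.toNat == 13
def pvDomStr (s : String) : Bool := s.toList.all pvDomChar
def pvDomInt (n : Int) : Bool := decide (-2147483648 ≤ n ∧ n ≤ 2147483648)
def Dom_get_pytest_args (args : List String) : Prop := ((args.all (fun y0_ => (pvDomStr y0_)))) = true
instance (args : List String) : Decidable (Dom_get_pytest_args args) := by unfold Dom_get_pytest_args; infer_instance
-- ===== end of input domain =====

-- B replaces A's if/elif ladder plus second loop by ONE pass over args that tracks the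
-- minimum selector rank and collects passthrough flags simultaneously (alternative; return value only).

-- ===== PORT A =====
def get_pytest_args (args : List String) : List String :=
  let pytest_args := ["python", "-m", "pytest"]
  let pytest_args := pytest_args ++ ["--tb=short", "-v"]
  let pytest_args :=
    if args.contains "--all" then pytest_args
    else if args.contains "--collect" then pytest_args ++ ["--collect-only", "-q"]
    else if args.contains "--domain" then pytest_args ++ ["tests/specification/domain/"]
    else if args.contains "--core" then pytest_args ++ ["tests/specification/core/"]
    else if args.contains "--unit" then pytest_args ++ ["tests/unit/"]
    else if args.contains "--integration" then pytest_args ++ ["tests/integration/"]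
    else if args.contains "--specification" then pytest_args ++ ["tests/specification/"]
    else if args.contains "--fast" then pytest_args ++ ["-m", "not slow"]
    else if args.contains "--help" then pytest_args ++ ["--help"]
    else pytest_args ++ ([] : List String)
  args.foldl (fun acc arg =>
    if !(PySem.Str.startswith arg "--") || ["--help", "--collect"].contains arg then acc
    else if ["--all", "--domain", "--core", "--unit", "--integration",
             "--specification", "--fast"].contains arg then acc
    else acc ++ [arg]) pytest_args

-- ===== PORT B =====
-- the _RANK dict literal (ofList of distinct keys = the raw association list)
def pvRank : PySem.Dict String Nat :=
  PySem.Dict.mk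
    [("--all", 0), ("--collect", 1), ("--domain", 2), ("--core", 3), ("--unit", 4),
     ("--integration", 5), ("--specification", 6), ("--fast", 7), ("--help", 8)]

def pvPayloads : List (List String) :=
  [[], ["--collect-only", "-q"], ["tests/specification/domain/"],
   ["tests/specification/core/"], ["tests/unit/"], ["tests/integration/"],
   ["tests/specification/"], ["-m", "not slow"], ["--help"], []]

def get_pytest_args_alt (args : List String) : List String :=
  let st := args.foldl (fun (st : Nat × List String) a =>
    match PySem.Dict.get? pvRank a with
    | some r => (if r < st.1 then r else st.1, st.2)
    | none => if PySem.Str.startswith a "--" then (st.1, st.2 ++ [a]) else st)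
    (9, [])
  -- _PAYLOADS[best]: best ≤ 9 always, so the Python index is in range
  ["python", "-m", "pytest", "--tb=short", "-v"] ++ pvPayloads.getD st.1 [] ++ st.2

-- ===== PRECONDITION & SPEC =====
def Spec_get_pytest_args (args : List String) (out : List String) : Prop := out = get_pytest_args_alt args
instance (args : List String) (out : List String) : Decidable (Spec_get_pytest_args args out) := by unfold Spec_get_pytest_args; infer_instance

-- ===== CLAIM =====
def Claim_equal_get_pytest_args : Prop := ∀ (args : List String), Dom_get_pytest_args args → Spec_get_pytest_args args (get_pytest_args args)

-- ===== LEMMAS AND PROOFS =====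

-- rank as a total function, and the min-rank of a list of args
def pvRankD (a : String) : Nat := (PySem.Dict.get? pvRank a).getD 9
def pvBest (args : List String) : Nat := args.foldl (fun b a => min b (pvRankD a)) 9
def pvPred (a : String) : Bool := (PySem.Dict.get? pvRank a).isNone && PySem.Str.startswith a "--"

theorem pv_rankD_le_9 (a : String) : pvRankD a ≤ 9 := by
  unfold pvRankD pvRank
  repeat rw [PySem.Dict.get?_mk_cons]
  split_ifs <;> simp [PySem.Dict.get?]

-- B's fold computes (min rank, filtered passthrough)
theorem pv_fold_spec (args : List String) (b : Nat) (e : List String) (hb : b ≤ 9) :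
    args.foldl (fun (st : Nat × List String) a =>
      match PySem.Dict.get? pvRank a with
      | some r => (if r < st.1 then r else st.1, st.2)
      | none => if PySem.Str.startswith a "--" then (st.1, st.2 ++ [a]) else st)
      (b, e)
    = (args.foldl (fun b a => min b (pvRankD a)) b, e ++ args.filter pvPred) := by
  induction args generalizing b e with
  | nil => simp
  | cons a args ih =>
      simp only [List.foldl_cons, List.filter_cons]
      cases hget : PySem.Dict.get? pvRank a with
      | some r =>
          have hr : pvRankD a = r := by simp [pvRankD, hget]
          have hmin : (if r < b then r else b) = min b (pvRankD a) := by
            rw [hr, Nat.min_def]; split_ifs <;> omega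
          have hp : pvPred a = false := by
            simp [pvPred, hget]
          simp only [hmin]
          rw [ih _ _ (by have := pv_rankD_le_9 a; rw [← hmin]; omega)]
          simp [hp]
      | none =>
          have hr : pvRankD a = 9 := by simp [pvRankD, hget]
          have hmin : min b (pvRankD a) = b := by rw [hr]; omega
          by_cases hs : PySem.Str.startswith a "--" = true
          · have hp : pvPred a = true := by
              simp only [pvPred, hget, Option.isNone_none, Bool.true_and]; exact hs
            rw [if_pos hs, ih _ _ hb]
            simp [hp, hmin]
          · have hp : pvPred a = false := by
              simp only [pvPred, hget, Option.isNone_none, Bool.true_and]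
              simpa using hs
            rw [if_neg hs, ih _ _ hb]
            simp [hp, hmin]

-- A's skip-style loop with two guards appends exactly the kept elements
theorem pv_foldl_two_skips (p q : String → Bool) (args acc : List String) :
    args.foldl (fun acc a => if p a then acc else if q a then acc else acc ++ [a]) acc
      = acc ++ args.filter (fun a => !p a && !q a) := by
  induction args generalizing acc with
  | nil => simp
  | cons a args ih =>
      by_cases hp : p a <;> by_cases hq : q a <;>
        simp [List.foldl_cons, hp, hq, ih]

-- A's two skip conditions keep exactly B's passthrough predicate
theorem pv_pred_eq (a : String) :
    (!(!(PySem.Str.startswith a "--") || ["--help", "--collect"].contains a) &&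
      !(["--all", "--domain", "--core", "--unit", "--integration",
         "--specification", "--fast"].contains a))
    = pvPred a := by
  simp only [pvPred, pvRank, PySem.Dict.get?_mk_cons,
    List.contains_cons, List.contains_nil]
  by_cases h1 : a = "--all" <;> by_cases h2 : a = "--collect" <;>
    by_cases h3 : a = "--domain" <;> by_cases h4 : a = "--core" <;>
    by_cases h5 : a = "--unit" <;> by_cases h6 : a = "--integration" <;>
    by_cases h7 : a = "--specification" <;> by_cases h8 : a = "--fast" <;>
    by_cases h9 : a = "--help" <;>
    simp_all [PySem.Dict.get?, eq_comm (b := a), beq_eq_decide]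

def pvFlags : List String :=
  ["--all", "--collect", "--domain", "--core", "--unit",
   "--integration", "--specification", "--fast", "--help"]

-- any string of rank < 9 is the corresponding flag
theorem pv_rankD_lt (a : String) (h : pvRankD a < 9) : a = pvFlags.getD (pvRankD a) "" := by
  unfold pvRankD pvRank at *
  repeat rw [PySem.Dict.get?_mk_cons] at h ⊢
  split_ifs at h ⊢ with h1 h2 h3 h4 h5 h6 h7 h8 h9 <;>
    simp_all [pvFlags, PySem.Dict.get?]

-- the fold-min is ≤ the rank of any member
theorem pv_best_le_of_mem (args : List String) (b : Nat) (a : String) (ha : a ∈ args) :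
    args.foldl (fun b a => min b (pvRankD a)) b ≤ pvRankD a := by
  induction args generalizing b with
  | nil => cases ha
  | cons x args ih =>
      simp only [List.foldl_cons]
      rcases List.mem_cons.mp ha with h | h
      · subst h
        have : ∀ (l : List String) (c : Nat),
            l.foldl (fun b a => min b (pvRankD a)) c ≤ c := by
          intro l; induction l with
          | nil => simp
          | cons y l ihl => intro c; exact le_trans (ihl _) (Nat.min_le_left _ _)
        exact le_trans (this args _) (by omega)
      · exact ih _ h

-- if the fold-min drops below k, some member has rank < k
theorem pv_exists_of_best_lt (args : List String) (b k : Nat)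
    (h : args.foldl (fun b a => min b (pvRankD a)) b < k) :
    b < k ∨ ∃ a ∈ args, pvRankD a < k := by
  induction args generalizing b with
  | nil => exact Or.inl h
  | cons x args ih =>
      simp only [List.foldl_cons] at h
      rcases ih _ h with h' | ⟨a, ha, hr⟩
      · by_cases hx : pvRankD x < k
        · exact Or.inr ⟨x, List.mem_cons_self, hx⟩
        · exact Or.inl (by omega)
      · exact Or.inr ⟨a, List.mem_cons_of_mem _ ha, hr⟩

-- pvBest equals the rank selected by A's if/elif chain
theorem pv_best_eq_chain (args : List String) :
    pvPayloads.getD (pvBest args) [] =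
      (if args.contains "--all" then []
       else if args.contains "--collect" then ["--collect-only", "-q"]
       else if args.contains "--domain" then ["tests/specification/domain/"]
       else if args.contains "--core" then ["tests/specification/core/"]
       else if args.contains "--unit" then ["tests/unit/"]
       else if args.contains "--integration" then ["tests/integration/"]
       else if args.contains "--specification" then ["tests/specification/"]
       else if args.contains "--fast" then ["-m", "not slow"]
       else if args.contains "--help" then ["--help"]
       else []) := by
  have rank_lit : pvRankD "--all" = 0 ∧ pvRankD "--collect" = 1 ∧ pvRankD "--domain" = 2 ∧
      pvRankD "--core" = 3 ∧ pvRankD "--unit" = 4 ∧ pvRankD "--integration" = 5 ∧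
      pvRankD "--specification" = 6 ∧ pvRankD "--fast" = 7 ∧ pvRankD "--help" = 8 := by decide
  obtain ⟨r0, r1, r2, r3, r4, r5, r6, r7, r8⟩ := rank_lit
  have hbest_le : ∀ a ∈ args, pvBest args ≤ pvRankD a := fun a ha =>
    pv_best_le_of_mem args 9 a ha
  have hno_lt : ∀ k, k ≤ 9 → pvBest args < k → ∃ a ∈ args, pvRankD a < k := by
    intro k hk h
    rcases pv_exists_of_best_lt args 9 k h with h' | h'
    · omega
    · exact h'
  have hmem : ∀ s : String, args.contains s = true ↔ s ∈ args := by
    intro s; exact List.contains_iff_mem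
  -- helper: if no flag of rank < i is in args then i ≤ pvBest args
  have hge : ∀ i : Nat, i ≤ 9 → (∀ j, j < i → pvFlags.getD j "" ∉ args) → i ≤ pvBest args := by
    intro i hi hnone
    rcases Nat.lt_or_ge (pvBest args) i with hlt | hge'
    swap
    · exact hge'
    obtain ⟨a, ha, hr⟩ := hno_lt i hi hlt
    have h9 : pvRankD a < 9 := by omega
    have := pv_rankD_lt a h9
    exact absurd (this ▸ ha) (hnone (pvRankD a) hr)
  split_ifs with h1 h2 h3 h4 h5 h6 h7 h8 h9
  · have : pvBest args = 0 := Nat.le_zero.mp (r0 ▸ hbest_le _ ((hmem _).mp h1))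
    simp [this, pvPayloads]
  · have hub := r1 ▸ hbest_le _ ((hmem _).mp h2)
    have hlb := hge 1 (by omega) (by
      intro j hj; interval_cases j
      simpa [pvFlags, hmem] using h1)
    have : pvBest args = 1 := by omega
    simp [this, pvPayloads]
  · have hub := r2 ▸ hbest_le _ ((hmem _).mp h3)
    have hlb := hge 2 (by omega) (by
      intro j hj; interval_cases j
      · simpa [pvFlags, hmem] using h1
      · simpa [pvFlags, hmem] using h2)
    have : pvBest args = 2 := by omega
    simp [this, pvPayloads]
  · have hub := r3 ▸ hbest_le _ ((hmem _).mp h4)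
    have hlb := hge 3 (by omega) (by
      intro j hj; interval_cases j
      · simpa [pvFlags, hmem] using h1
      · simpa [pvFlags, hmem] using h2
      · simpa [pvFlags, hmem] using h3)
    have : pvBest args = 3 := by omega
    simp [this, pvPayloads]
  · have hub := r4 ▸ hbest_le _ ((hmem _).mp h5)
    have hlb := hge 4 (by omega) (by
      intro j hj; interval_cases j
      · simpa [pvFlags, hmem] using h1
      · simpa [pvFlags, hmem] using h2
      · simpa [pvFlags, hmem] using h3
      · simpa [pvFlags, hmem] using h4)
    have : pvBest args = 4 := by omega
    simp [this, pvPayloads]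
  · have hub := r5 ▸ hbest_le _ ((hmem _).mp h6)
    have hlb := hge 5 (by omega) (by
      intro j hj; interval_cases j
      · simpa [pvFlags, hmem] using h1
      · simpa [pvFlags, hmem] using h2
      · simpa [pvFlags, hmem] using h3
      · simpa [pvFlags, hmem] using h4
      · simpa [pvFlags, hmem] using h5)
    have : pvBest args = 5 := by omega
    simp [this, pvPayloads]
  · have hub := r6 ▸ hbest_le _ ((hmem _).mp h7)
    have hlb := hge 6 (by omega) (by
      intro j hj; interval_cases j
      · simpa [pvFlags, hmem] using h1
      · simpa [pvFlags, hmem] using h2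
      · simpa [pvFlags, hmem] using h3
      · simpa [pvFlags, hmem] using h4
      · simpa [pvFlags, hmem] using h5
      · simpa [pvFlags, hmem] using h6)
    have : pvBest args = 6 := by omega
    simp [this, pvPayloads]
  · have hub := r7 ▸ hbest_le _ ((hmem _).mp h8)
    have hlb := hge 7 (by omega) (by
      intro j hj; interval_cases j
      · simpa [pvFlags, hmem] using h1
      · simpa [pvFlags, hmem] using h2
      · simpa [pvFlags, hmem] using h3
      · simpa [pvFlags, hmem] using h4
      · simpa [pvFlags, hmem] using h5
      · simpa [pvFlags, hmem] using h6
      · simpa [pvFlags, hmem] using h7)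
    have : pvBest args = 7 := by omega
    simp [this, pvPayloads]
  · have hub := r8 ▸ hbest_le _ ((hmem _).mp h9)
    have hlb := hge 8 (by omega) (by
      intro j hj; interval_cases j
      · simpa [pvFlags, hmem] using h1
      · simpa [pvFlags, hmem] using h2
      · simpa [pvFlags, hmem] using h3
      · simpa [pvFlags, hmem] using h4
      · simpa [pvFlags, hmem] using h5
      · simpa [pvFlags, hmem] using h6
      · simpa [pvFlags, hmem] using h7
      · simpa [pvFlags, hmem] using h8)
    have : pvBest args = 8 := by omega
    simp [this, pvPayloads]
  · have hlb := hge 9 (by omega) (by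
      intro j hj; interval_cases j
      · simpa [pvFlags, hmem] using h1
      · simpa [pvFlags, hmem] using h2
      · simpa [pvFlags, hmem] using h3
      · simpa [pvFlags, hmem] using h4
      · simpa [pvFlags, hmem] using h5
      · simpa [pvFlags, hmem] using h6
      · simpa [pvFlags, hmem] using h7
      · simpa [pvFlags, hmem] using h8
      · simpa [pvFlags, hmem] using h9)
    have hub : pvBest args ≤ 9 := by
      have : ∀ (l : List String) (c : Nat),
          l.foldl (fun b a => min b (pvRankD a)) c ≤ c := by
        intro l; induction l with
        | nil => simp
        | cons y l ihl => intro c; exact le_trans (ihl _) (Nat.min_le_left _ _)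
      exact this args 9
    have : pvBest args = 9 := by omega
    simp [this, pvPayloads]

-- ===== VERDICT =====
theorem get_pytest_args_spec : Claim_equal_get_pytest_args := by
  intro args _
  show get_pytest_args args = get_pytest_args_alt args
  unfold get_pytest_args get_pytest_args_alt
  rw [pv_foldl_two_skips, pv_fold_spec args 9 [] (by omega)]
  rw [List.filter_congr (fun a _ => pv_pred_eq a)]
  have := pv_best_eq_chain args
  unfold pvBest at this
  split_ifs at this ⊢ <;> simp_all
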